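-- pv_equiv track=rewrite | github.com/sharmakajal0/codechef_problems | EASY/ATTIC.sol.py | attic
-- ===== SOURCE A (Python) =====
-- def attic(test_string):
--
--     '''Function definition for attic crossing'''
--     count = 0
--     days = 0
--     initial = 1
--     # a = len(test_string)
--     for _, sym in enumerate(test_string, 0):
--         if sym == '.':
--             count += 1
--         else:
--             if count >= initial:
--                 days += 1
--                 initial = count + 1
--             count = 0
--
--     return days
-- ===== SOURCE B (Python) =====
-- def attic(test_string):
--     '''Function definition for attic crossing'''
--     # Pass 1: run-length encode the maximal '.'-runs that are followed by a non-dot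
--     lengths = []
--     run = 0
--     for c in test_string:
--         if c == '.':
--             run += 1
--         else:
--             if run > 0:
--                 lengths.append(run)
--             run = 0
--     # Pass 2: greedy threshold count over the run lengths
--     days = 0
--     threshold = 1
--     for l in lengths:
--         if l >= threshold:
--             days += 1
--             threshold = l + 1
--     return days
-- ===== Notes on version B (the rewrite author's own statement) =====
-- stated objective: alternative
-- what changed: A's single fused scan with three pieces of state is split into a run-length-encoding pass (lengths of dot-runs terminated by a non-dot) followed by a separate greedy threshold pass over that list.
import Mathlib
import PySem

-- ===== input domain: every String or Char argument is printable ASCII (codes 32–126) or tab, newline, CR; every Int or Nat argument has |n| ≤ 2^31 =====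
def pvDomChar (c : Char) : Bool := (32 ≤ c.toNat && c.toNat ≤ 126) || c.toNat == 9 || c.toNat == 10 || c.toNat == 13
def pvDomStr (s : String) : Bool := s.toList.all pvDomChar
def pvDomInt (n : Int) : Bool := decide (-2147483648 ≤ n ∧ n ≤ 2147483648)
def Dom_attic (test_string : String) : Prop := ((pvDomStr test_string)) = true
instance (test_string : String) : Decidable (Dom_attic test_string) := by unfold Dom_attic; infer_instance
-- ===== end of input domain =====

-- B splits A's fused scan into a run-length pass over dot-runs plus a separate greedy counting pass (alternative decomposition, same cost).


-- ===== PORT A =====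
-- A's single loop: state (count, days, initial)
def atticLoop : List Char → Int → Int → Int → Int
  | [], _, days, _ => days
  | c :: rest, count, days, initial =>
    if c = '.' then atticLoop rest (count + 1) days initial
    else if count ≥ initial then atticLoop rest 0 (days + 1) (count + 1)
    else atticLoop rest 0 days initial

def attic (test_string : String) : Int := atticLoop test_string.toList 0 0 1

-- ===== PORT B =====
-- B pass 1: lengths of maximal '.'-runs that are followed by a non-dot (trailing run dropped)
def atticRuns : List Char → Int → List Int
  | [], _ => []
  | c :: rest, run =>
    if c = '.' then atticRuns rest (run + 1)
    else if run > 0 then run :: atticRuns rest 0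
    else atticRuns rest 0

-- B pass 2: greedy threshold count over the run lengths
def atticGreedy : List Int → Int → Int → Int
  | [], days, _ => days
  | l :: rest, days, threshold =>
    if l ≥ threshold then atticGreedy rest (days + 1) (l + 1)
    else atticGreedy rest days threshold

def attic_alt (test_string : String) : Int :=
  atticGreedy (atticRuns test_string.toList 0) 0 1

-- ===== PRECONDITION & SPEC =====
def Spec_attic (test_string : String) (out : Int) : Prop := out = attic_alt test_string
instance (test_string : String) (out : Int) : Decidable (Spec_attic test_string out) := by unfold Spec_attic; infer_instance

-- ===== CLAIM (what is proved, stated in full; the proofs are below) =====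
def Claim_equal_attic : Prop := ∀ (test_string : String), Dom_attic test_string → Spec_attic test_string (attic test_string)

-- ===== LEMMAS AND PROOFS =====
theorem atticLoop_eq_greedy_runs (l : List Char) :
    ∀ (count days initial : Int), 0 ≤ count → 1 ≤ initial →
      atticLoop l count days initial = atticGreedy (atticRuns l count) days initial := by
  induction l with
  | nil => intro count days initial _ _; simp [atticLoop, atticRuns, atticGreedy]
  | cons c rest ih =>
    intro count days initial hc hi
    by_cases hdot : c = '.'
    · simp [atticLoop, atticRuns, hdot]
      exact ih (count + 1) days initial (by omega) hi
    · by_cases hge : count ≥ initial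
      · have hpos : count > 0 := by omega
        simp [atticLoop, atticRuns, atticGreedy, hdot, hge, hpos]
        exact ih 0 (days + 1) (count + 1) le_rfl (by omega)
      · by_cases hpos : count > 0
        · have hlt : ¬ (count ≥ initial) := hge
          simp [atticLoop, atticRuns, atticGreedy, hdot, hge, hpos]
          exact ih 0 days initial le_rfl hi
        · simp [atticLoop, atticRuns, hdot, hge, hpos]
          exact ih 0 days initial le_rfl hi

-- ===== VERDICT (by name: the statement is the Claim_ definition above) =====
theorem attic_spec : Claim_equal_attic := by
  intro s _
  unfold Spec_attic attic attic_alt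
  exact atticLoop_eq_greedy_runs s.toList 0 0 1 le_rfl le_rfl
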